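-- pv_equiv track=rewrite | github.com/J0131/Coding-Test-Solving | 프로그래머스/[Lv.1] 신규 아이디 추천.py | solution
-- ===== SOURCE A (Python) =====
-- def solution(new_id):
--
--     answer = []
--     new_id = new_id.lower()
--     new_id = [i for i in new_id]
--     dot_count = 0
--
--     for i in new_id:
--         if i.isdigit() or i.islower() or i == '-' or i == '_':
--             answer.append(i)
--             dot_count = 0
--         elif i == '.':
--             dot_count += 1
--             if dot_count < 2:
--                 answer.append(i)
--
--     if answer and answer[0] == '.':
--         answer.pop(0)
--
--     if answer and answer[-1] == '.':
--         answer.pop()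
--
--     if not answer:
--         answer.append("a")
--
--     if len(answer) >= 16:
--         answer = answer[0:15]
--         if answer[14] == ".":
--             answer.pop()
--
--     if len(answer) <= 2:
--         while len(answer) < 3:
--             answer.append(answer[-1])
--
--     answer = ''.join(answer)
--     return answer
-- ===== SOURCE B (Python) =====
-- ALLOWED = "abcdefghijklmnopqrstuvwxyz0123456789-_."
--
--
-- def solution(new_id):
--     s = "".join(c for c in new_id.lower() if c in ALLOWED)
--     # collapse runs of dots: keep a dot only when the previous char is not a dot
--     s = "".join(c for p, c in zip("/" + s, s) if p != "." or c != ".")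
--     if s.startswith("."):
--         s = s[1:]
--     if s.endswith("."):
--         s = s[:-1]
--     if not s:
--         s = "a"
--     s = s[:15]
--     if s.endswith("."):
--         s = s[:-1]
--     return s.ljust(3, s[-1])
-- ===== Notes on version B (the rewrite author's own statement) =====
-- stated objective: idiomatic
-- what changed: Replaces the fused single char loop with a dot_count counter by a multi-pass pipeline of string operations: filter allowed chars, collapse dot runs by a pairwise zip pass, strip one leading/trailing dot with slices, default, truncate, and pad with str.ljust.
import Mathlib
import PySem

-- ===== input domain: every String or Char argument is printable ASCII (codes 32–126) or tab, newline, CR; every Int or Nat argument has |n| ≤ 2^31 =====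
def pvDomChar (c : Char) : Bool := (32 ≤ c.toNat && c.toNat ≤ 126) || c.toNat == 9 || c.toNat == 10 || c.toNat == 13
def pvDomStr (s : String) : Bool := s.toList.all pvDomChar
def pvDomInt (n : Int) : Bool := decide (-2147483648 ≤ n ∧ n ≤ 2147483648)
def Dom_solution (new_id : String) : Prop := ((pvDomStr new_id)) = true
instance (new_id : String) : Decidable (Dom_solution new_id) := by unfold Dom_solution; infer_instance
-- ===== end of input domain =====

-- B replaces A's fused char loop with dot_count by a multi-pass pipeline (filter, pairwise dot-collapse, strip, truncate, ljust); same cost, more idiomatic.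


-- ===== PORT A =====
-- one iteration of A's for-loop: state = (answer, dot_count)
def stepA (st : List Char × Nat) (c : Char) : List Char × Nat :=
  if PySem.Chars.isdigit c || PySem.Chars.islower c || c == '-' || c == '_' then
    (st.1 ++ [c], 0)
  else if c == '.' then
    (if st.2 + 1 < 2 then st.1 ++ [c] else st.1, st.2 + 1)
  else st

-- A's final 'while len(answer) < 3: answer.append(answer[-1])'
def padWhile (l : List Char) : List Char :=
  if _h : l.length < 3 then
    match l.getLast? with
    | some c => padWhile (l ++ [c])
    | none => l
  else l
termination_by 3 - l.length
decreasing_by simp; omega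

def solution (new_id : String) : String :=
  let l := PySem.Chars.lower new_id.toList
  let answer := (l.foldl stepA ([], 0)).1
  -- if answer and answer[0] == '.': answer.pop(0)
  let a1 := if answer.head? == some '.' then answer.tail else answer
  -- if answer and answer[-1] == '.': answer.pop()
  let a2 := if a1.getLast? == some '.' then a1.dropLast else a1
  -- if not answer: answer.append("a")
  let a3 := if a2.isEmpty then ['a'] else a2
  -- if len(answer) >= 16: answer = answer[0:15]; if answer[14] == '.': answer.pop()
  let a4 := if 16 ≤ a3.length then
      (let t := PySem.List.slice a3 (some 0) (some 15)
       if PySem.List.pyGet? t 14 == some '.' then t.dropLast else t)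
    else a3
  -- if len(answer) <= 2: while len(answer) < 3: answer.append(answer[-1])
  let a5 := if a4.length ≤ 2 then padWhile a4 else a4
  String.mk a5

-- ===== PORT B =====
-- the Python constant ALLOWED, as its list of characters
def allowedChars : List Char := "abcdefghijklmnopqrstuvwxyz0123456789-_.".toList

def solution_alt (new_id : String) : String :=
  let s0 := PySem.Chars.lower new_id.toList
  -- ''.join(c for c in s if c in ALLOWED)
  let s1 := s0.filter (fun c => allowedChars.contains c)
  -- ''.join(c for p, c in zip("/" + s, s) if p != "." or c != ".")
  let s2 := ((('/' :: s1).zip s1).filter (fun pc => !(pc.1 == '.' && pc.2 == '.'))).map Prod.snd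
  -- if s.startswith('.'): s = s[1:]
  let s3 := if PySem.Chars.startswith s2 ['.'] then s2.tail else s2
  -- if s.endswith('.'): s = s[:-1]
  let s4 := if PySem.Chars.endswith s3 ['.'] then s3.dropLast else s3
  -- if not s: s = 'a'
  let s5 := if s4.isEmpty then ['a'] else s4
  -- s = s[:15]
  let s6 := PySem.List.slice s5 none (some 15)
  -- if s.endswith('.'): s = s[:-1]
  let s7 := if PySem.Chars.endswith s6 ['.'] then s6.dropLast else s6
  -- return s.ljust(3, s[-1])
  match s7.getLast? with
  | some c => String.mk (s7 ++ List.replicate (3 - s7.length) c)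
  | none => String.mk s7

-- ===== PRECONDITION & SPEC =====
def Spec_solution (new_id : String) (out : String) : Prop := out = solution_alt new_id
instance (new_id : String) (out : String) : Decidable (Spec_solution new_id out) := by unfold Spec_solution; infer_instance

-- ===== CLAIM (what is proved, stated in full; the proofs are below) =====
def Claim_equal_solution : Prop := ∀ (new_id : String), Dom_solution new_id → Spec_solution new_id (solution new_id)

-- ===== LEMMAS AND PROOFS =====

-- reference form of the dot-collapsing pass: pd = "previous kept-or-seen char was a dot"
def collapseD (pd : Bool) : List Char → List Char
  | [] => []
  | c :: t =>
    if c = '.' then (if pd then collapseD true t else '.' :: collapseD true t)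
    else c :: collapseD false t

-- A's per-char test (after lowering) agrees with membership in ALLOWED, for every Char
lemma char_class (c : Char) :
    (PySem.Chars.isdigit c || PySem.Chars.islower c || c == '-' || c == '_' || c == '.')
      = allowedChars.contains c := by
  rw [Bool.eq_iff_iff]
  simp only [show allowedChars =
      ['a','b','c','d','e','f','g','h','i','j','k','l','m','n','o','p','q','r','s','t','u','v',
       'w','x','y','z','0','1','2','3','4','5','6','7','8','9','-','_','.'] from rfl,
    PySem.Chars.isdigit, PySem.Chars.islower, List.contains_eq_mem,
    List.mem_cons, List.not_mem_nil, or_false, Bool.or_eq_true, Bool.and_eq_true,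
    decide_eq_true_eq, beq_iff_eq, Char.le_def, UInt32.le_iff_toNat_le, Char.ext_iff,
    UInt32.ext_iff, eq_comm (a := c)]
  rcases c with ⟨⟨⟨v, hv⟩⟩⟩
  simp only [
    show ('a').val.toNat = 97 from rfl, show ('b').val.toNat = 98 from rfl,
    show ('c').val.toNat = 99 from rfl, show ('d').val.toNat = 100 from rfl,
    show ('e').val.toNat = 101 from rfl, show ('f').val.toNat = 102 from rfl,
    show ('g').val.toNat = 103 from rfl, show ('h').val.toNat = 104 from rfl,
    show ('i').val.toNat = 105 from rfl, show ('j').val.toNat = 106 from rfl,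
    show ('k').val.toNat = 107 from rfl, show ('l').val.toNat = 108 from rfl,
    show ('m').val.toNat = 109 from rfl, show ('n').val.toNat = 110 from rfl,
    show ('o').val.toNat = 111 from rfl, show ('p').val.toNat = 112 from rfl,
    show ('q').val.toNat = 113 from rfl, show ('r').val.toNat = 114 from rfl,
    show ('s').val.toNat = 115 from rfl, show ('t').val.toNat = 116 from rfl,
    show ('u').val.toNat = 117 from rfl, show ('v').val.toNat = 118 from rfl,
    show ('w').val.toNat = 119 from rfl, show ('x').val.toNat = 120 from rfl,
    show ('y').val.toNat = 121 from rfl, show ('z').val.toNat = 122 from rfl,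
    show ('0').val.toNat = 48 from rfl, show ('1').val.toNat = 49 from rfl,
    show ('2').val.toNat = 50 from rfl, show ('3').val.toNat = 51 from rfl,
    show ('4').val.toNat = 52 from rfl, show ('5').val.toNat = 53 from rfl,
    show ('6').val.toNat = 54 from rfl, show ('7').val.toNat = 55 from rfl,
    show ('8').val.toNat = 56 from rfl, show ('9').val.toNat = 57 from rfl,
    show ('-').val.toNat = 45 from rfl, show ('_').val.toNat = 95 from rfl,
    show ('.').val.toNat = 46 from rfl]
  omega

lemma loopA_eq (l : List Char) (acc : List Char) (dc : Nat) :
    (List.foldl stepA (acc, dc) l).1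
      = acc ++ collapseD (decide (0 < dc)) (l.filter (fun c => allowedChars.contains c)) := by
  induction l generalizing acc dc with
  | nil => simp [collapseD]
  | cons c t ih =>
    simp only [List.foldl_cons, List.filter_cons]
    have hc := char_class c
    by_cases hv : (PySem.Chars.isdigit c || PySem.Chars.islower c || c == '-' || c == '_') = true
    · have hne : c ≠ '.' := by
        rintro rfl; exact absurd hv (by decide)
      have hcon : allowedChars.contains c = true := by rw [← hc]; simp [hv]
      rw [show stepA (acc, dc) c = (acc ++ [c], 0) from by simp [stepA, hv], ih, hcon]
      simp [collapseD, hne]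
    · by_cases hd : c = '.'
      · subst hd
        have hcon : allowedChars.contains '.' = true := by rw [← hc]; simp
        rw [show stepA (acc, dc) '.'
              = (if dc + 1 < 2 then acc ++ ['.'] else acc, dc + 1) from by
            simp [stepA] at hv ⊢; simp [hv], ih, hcon]
        rcases Nat.eq_zero_or_pos dc with h0 | h0
        · subst h0; simp [collapseD]
        · have h2 : ¬ (dc + 1 < 2) := by omega
          have hdc : decide (0 < dc) = true := by simpa using h0
          simp [collapseD, h2, hdc]
      · simp only [Bool.not_eq_true] at hv
        have hcon : allowedChars.contains c = false := by
          rw [← hc]; simp [hv, hd]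
        rw [show stepA (acc, dc) c = (acc, dc) from by simp [stepA, hv, hd], ih, hcon]
        simp
  
lemma zip_eq_collapse (l : List Char) (p : Char) :
    ((((p :: l).zip l).filter (fun pc => !(pc.1 == '.' && pc.2 == '.'))).map Prod.snd)
      = collapseD (p == '.') l := by
  induction l generalizing p with
  | nil => simp [collapseD]
  | cons c t ih =>
    rw [List.zip_cons_cons, List.filter_cons]
    by_cases hp : p = '.'
    · by_cases hcdot : c = '.'
      · subst hp; subst hcdot
        simpa [collapseD] using ih '.'
      · subst hp
        simp only [show (!(('.' : Char) == '.' && c == '.')) = true from by simp [hcdot],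
          if_true, List.map_cons, ih c]
        simp [collapseD, hcdot, show (c == '.') = false from by simp [hcdot]]
    · simp only [show (!((p : Char) == '.' && c == '.')) = true from by simp [hp],
        if_true, List.map_cons, ih c]
      by_cases hcdot : c = '.'
      · simp [collapseD, hcdot, show (p == '.') = false from by simp [hp]]
      · simp [collapseD, hcdot, show (c == '.') = false from by simp [hcdot]]

lemma collapse_head (l : List Char) : (collapseD true l).head? ≠ some '.' := by
  induction l with
  | nil => simp [collapseD]
  | cons c t ih =>
    by_cases hc : c = '.'
    · subst hc; simpa [collapseD] using ih
    · simp [collapseD, hc]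

lemma collapse_chain (pd : Bool) (l : List Char) :
    List.IsChain (fun a b => ¬(a = '.' ∧ b = '.')) (collapseD pd l) := by
  induction l generalizing pd with
  | nil => simp [collapseD]
  | cons c t ih =>
    by_cases hc : c = '.'
    · subst hc
      cases pd with
      | true => simpa [collapseD] using ih true
      | false =>
        show List.IsChain _ ('.' :: collapseD true t)
        refine List.IsChain.cons (ih true) ?_
        intro y hy hcontra
        exact collapse_head t (by rw [Option.mem_def] at hy; rw [hy, hcontra.2])
    · show List.IsChain _ (if c = '.' then _ else c :: collapseD false t)
      rw [if_neg hc]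
      refine List.IsChain.cons (ih false) ?_
      intro y _ hcontra
      exact hc hcontra.1

lemma prefix_singleton (c : Char) (v : List Char) :
    List.isPrefixOf [c] v = (v.head? == some c) := by
  cases v with
  | nil => simp [List.isPrefixOf]
  | cons b t => simp [List.isPrefixOf, BEq.comm]

lemma suffix_singleton (c : Char) (v : List Char) :
    List.isSuffixOf [c] v = (v.getLast? == some c) := by
  rw [List.isSuffixOf, List.getLast?_eq_head?_reverse]
  simpa using prefix_singleton c v.reverse

lemma dropLast_getLast (v : List Char)
    (hc : List.IsChain (fun a b => ¬(a = '.' ∧ b = '.')) v)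
    (hl : v.getLast? = some '.') : v.dropLast.getLast? ≠ some '.' := by
  induction v with
  | nil => simp at hl
  | cons a t ih =>
    cases t with
    | nil => simp
    | cons b u =>
      cases u with
      | nil =>
        simp only [List.getLast?_cons_cons, List.getLast?_singleton, Option.some_inj] at hl
        have hab := (List.isChain_cons_cons.mp hc).1
        rw [List.dropLast_cons₂, show ([b] : List Char).dropLast = [] from rfl]
        simp only [List.getLast?_singleton, ne_eq, Option.some_inj]
        intro ha; exact hab ⟨ha, hl⟩
      | cons x y =>
        have ih' := ih hc.tail (by simpa using hl)
        rw [show ((b :: x :: y : List Char).dropLast) = b :: (x :: y).dropLast from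
          List.dropLast_cons₂ ..] at ih'
        rw [List.dropLast_cons₂, show ((b :: x :: y : List Char).dropLast)
          = b :: (x :: y).dropLast from List.dropLast_cons₂ .., List.getLast?_cons_cons]
        exact ih'

lemma padWhile_long (x y z : Char) (r : List Char) :
    padWhile (x :: y :: z :: r) = x :: y :: z :: r := by
  rw [padWhile]; simp

lemma padWhile_two (x y : Char) : padWhile [x, y] = [x, y, y] := by
  rw [padWhile]; simpa using padWhile_long x y y []

lemma padWhile_one (x : Char) : padWhile [x] = [x, x, x] := by
  rw [padWhile]; simpa using padWhile_two x x

lemma pad_eq (v : List Char) (c : Char) (h : v.getLast? = some c) :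
    (if v.length ≤ 2 then padWhile v else v) = v ++ List.replicate (3 - v.length) c := by
  match v with
  | [] => simp at h
  | [a] =>
    simp only [List.getLast?_singleton, Option.some_inj] at h
    subst h
    rw [if_pos (by norm_num), padWhile_one]
    simp
  | [a, b] =>
    simp only [List.getLast?_cons_cons, List.getLast?_singleton, Option.some_inj] at h
    subst h
    rw [if_pos (by norm_num), padWhile_two]
    simp
  | a :: b :: d :: t =>
    have hlen : (a :: b :: d :: t).length = t.length + 3 := by simp
    rw [if_neg (by simp [hlen]), show 3 - (a :: b :: d :: t).length = 0 from by omega]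
    simp

-- ===== VERDICT (by name: the statement is the Claim_ definition above) =====
theorem solution_spec : Claim_equal_solution := by
  unfold Claim_equal_solution
  intro new_id _
  unfold Spec_solution solution solution_alt
  dsimp only
  -- both sides start from the same lowered list
  set l := PySem.Chars.lower new_id.toList with hl
  set k := l.filter (fun c => allowedChars.contains c) with hk
  -- the fused loop of A equals the filter + collapse passes of B
  have hA : (List.foldl stepA ([], 0) l).1 = collapseD false k := by
    have := loopA_eq l [] 0
    rw [show (decide ((0:Nat) < 0)) = false from rfl] at this
    simpa only [List.nil_append, hk] using this
  have hB : ((('/' :: k).zip k).filter (fun pc => !(pc.1 == '.' && pc.2 == '.'))).map Prod.snd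
      = collapseD false k := by
    simpa using zip_eq_collapse k '/'
  rw [hA, hB]
  set u := collapseD false k with hu
  -- leading-dot strip: A's head?/tail matches B's startswith/tail
  simp only [PySem.Chars.startswith, PySem.Chars.endswith, prefix_singleton, suffix_singleton]
  set s3 := if u.head? == some '.' then u.tail else u with hs3
  set s4 := if s3.getLast? == some '.' then s3.dropLast else s3 with hs4
  set s5 := if s4.isEmpty then ['a'] else s4 with hs5
  -- s4 never ends with a dot (the collapsed list has no adjacent dots)
  have hchain3 : List.IsChain (fun a b => ¬(a = '.' ∧ b = '.')) s3 := by
    rw [hs3]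
    split
    · exact List.IsChain.tail (collapse_chain false k)
    · exact collapse_chain false k
  have hs4last : s4.getLast? ≠ some '.' := by
    rw [hs4]
    by_cases hgl : s3.getLast? = some '.'
    · rw [if_pos (by simp [hgl])]
      exact dropLast_getLast s3 hchain3 hgl
    · rw [if_neg (by simpa using hgl)]
      exact hgl
  have hs5last : s5.getLast? ≠ some '.' := by
    rw [hs5]
    split
    · decide
    · exact hs4last
  have hs5ne : s5 ≠ [] := by
    rw [hs5]; split
    · simp
    · rename_i hne; simpa [List.isEmpty_iff] using hne
  -- truncation stage: A's guarded slice equals B's unguarded one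
  have hsl2 : PySem.List.slice s5 none (some 15) = s5.take 15 := by simp [pysem]
  have htrunc :
      (if 16 ≤ s5.length then
        (let t := PySem.List.slice s5 (some 0) (some 15)
         if PySem.List.pyGet? t 14 == some '.' then t.dropLast else t)
       else s5)
      = (if (PySem.List.slice s5 none (some 15)).getLast? == some '.'
         then (PySem.List.slice s5 none (some 15)).dropLast
         else PySem.List.slice s5 none (some 15)) := by
    have hsl : PySem.List.slice s5 (some 0) (some 15) = s5.take 15 := by simp [pysem]
    rw [hsl, hsl2]
    dsimp only
    by_cases h16 : 16 ≤ s5.length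
    · rw [if_pos h16]
      have hlen : (s5.take 15).length = 15 := by simp; omega
      have hpg : PySem.List.pyGet? (s5.take 15) 14 = (s5.take 15).getLast? := by
        rw [show (14 : Int) = ((14 : Nat) : Int) from rfl, PySem.List.pyGet?_natCast]
        rw [List.getLast?_eq_getElem?, hlen]
      rw [hpg]
    · rw [if_neg h16]
      have htk : s5.take 15 = s5 := List.take_of_length_le (by omega)
      rw [htk, if_neg (by simpa using hs5last)]
  rw [htrunc]
  set s7 := (if (PySem.List.slice s5 none (some 15)).getLast? == some '.'
         then (PySem.List.slice s5 none (some 15)).dropLast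
         else PySem.List.slice s5 none (some 15)) with hs7
  -- the padding stage: s7 is nonempty, A's while-loop is B's ljust
  have hs7ne : s7 ≠ [] := by
    rw [hs7, hsl2]
    by_cases h16 : 16 ≤ s5.length
    · have hlen : (s5.take 15).length = 15 := by simp; omega
      split
      · intro hemp; have := congrArg List.length hemp; simp [hlen] at this
      · intro hemp; have := congrArg List.length hemp; simp [hlen] at this
    · have htk : s5.take 15 = s5 := List.take_of_length_le (by omega)
      rw [htk, if_neg (by simpa using hs5last)]
      exact hs5ne
  have hgl : s7.getLast? ≠ none := by simpa [List.getLast?_eq_none_iff] using hs7ne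
  obtain ⟨c, hc⟩ := Option.ne_none_iff_exists'.mp hgl
  rw [hc, pad_eq s7 c hc]
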